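-- pv_equiv track=rewrite | github.com/Cephalobyte/Enigma-Modding-Assistant | modules/_quickmod/batchrenamer.py | fontcharwidth
-- ===== SOURCE A (Python) =====
-- import string
--
-- def fontcharwidth(fontwidths:list[str]) ->dict[str,int]:
-- 	chars = string.ascii_uppercase + string.digits + string.punctuation + ' '
-- 	widths = {}
--
-- 	for c in chars: #-----------------------------------------------------------check every character
-- 		for w, fw in enumerate(fontwidths): #-----------------------------------compare to lists of widths
-- 			if c in fw:
-- 				widths[c] = w+2 #-----------------------------------------------+1 because index 0 is width 1, +1 for kerning
--
-- 	return widths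
-- ===== SOURCE B (Python) =====
-- import string
--
-- def fontcharwidth(fontwidths: list[str]) -> dict[str, int]:
--     allowed = string.ascii_uppercase + string.digits + string.punctuation + ' '
--     # one pass over the fontwidth strings: remember the last list index of each char
--     last = {}
--     for w, fw in enumerate(fontwidths):
--         for ch in fw:
--             last[ch] = w
--     # emit the allowed chars (in their canonical order) that appeared anywhere
--     return {c: last[c] + 2 for c in allowed if c in last}
-- ===== Notes on version B (the rewrite author's own statement) =====
-- stated objective: faster
-- what changed: Instead of testing each of the 69 allowed characters against every fontwidth string (a substring scan per pair), B makes one pass over the fontwidth strings recording each character's last list index in a dict, then emits the allowed characters that appeared; last-index-wins matches A's overwrite order.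
import Mathlib
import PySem

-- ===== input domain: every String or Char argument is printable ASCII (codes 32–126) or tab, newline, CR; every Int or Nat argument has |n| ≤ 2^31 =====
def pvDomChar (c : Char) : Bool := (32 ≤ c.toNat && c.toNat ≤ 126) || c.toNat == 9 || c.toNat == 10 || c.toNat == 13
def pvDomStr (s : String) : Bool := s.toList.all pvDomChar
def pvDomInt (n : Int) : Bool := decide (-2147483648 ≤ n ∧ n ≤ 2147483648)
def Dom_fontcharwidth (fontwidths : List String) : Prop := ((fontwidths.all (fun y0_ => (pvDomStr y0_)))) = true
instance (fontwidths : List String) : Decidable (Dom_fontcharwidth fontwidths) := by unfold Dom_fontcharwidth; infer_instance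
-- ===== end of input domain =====

-- B replaces A's allowed-char × fontwidth scan with one pass over the fontwidths recording last indices, then a filtered emission (alternative decomposition).



-- ===== PORT A =====
-- A: for each allowed char, scan every fontwidth string; last match wins.
def pvChars : String := "ABCDEFGHIJKLMNOPQRSTUVWXYZ0123456789!\"#$%&'()*+,-./:;<=>?@[\\]^_`{|}~ "

def fontcharwidth (fontwidths : List String) : List (String × Int) :=
  (pvChars.toList.foldl (fun (widths : PySem.Dict String Int) c =>
    (PySem.List.enumerate fontwidths).foldl (fun (widths : PySem.Dict String Int) p =>
      if c ∈ p.2.toList then widths.insert (String.singleton c) (p.1 + 2) else widths) widths)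
    PySem.Dict.empty).items

-- ===== PORT B =====
-- B: one pass over the fontwidth strings recording each char's last list index,
-- then a filtered emission over the allowed characters (different decomposition).
def fontcharwidth_alt (fontwidths : List String) : List (String × Int) :=
  let last : PySem.Dict String Int :=
    (PySem.List.enumerate fontwidths).foldl (fun (d : PySem.Dict String Int) p =>
      p.2.toList.foldl (fun (d : PySem.Dict String Int) ch =>
        d.insert (String.singleton ch) p.1) d)
      PySem.Dict.empty
  (pvChars.toList.foldl (fun (res : PySem.Dict String Int) c =>
    match last.get? (String.singleton c) with
    | some w => res.insert (String.singleton c) (w + 2)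
    | none => res)
    PySem.Dict.empty).items

-- ===== PRECONDITION & SPEC =====
def Spec_fontcharwidth (fontwidths : List String) (out : List (String × Int)) : Prop := out = fontcharwidth_alt fontwidths
instance (fontwidths : List String) (out : List (String × Int)) : Decidable (Spec_fontcharwidth fontwidths out) := by unfold Spec_fontcharwidth; infer_instance

-- ===== CLAIM (what is proved, stated in full; the proofs are below) =====
def Claim_equal_fontcharwidth : Prop := ∀ (fontwidths : List String), Dom_fontcharwidth fontwidths → Spec_fontcharwidth fontwidths (fontcharwidth fontwidths)


-- ===== LEMMAS AND PROOFS =====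

-- last index i (as stored by either loop) with c a member, folded form
def pvLastIdx (c : Char) (l : List (Int × String)) (acc : Option Int) : Option Int :=
  l.foldl (fun a p => if c ∈ p.2.toList then some p.1 else a) acc

theorem pvLastIdx_acc (c : Char) (l : List (Int × String)) (acc : Option Int) :
    pvLastIdx c l acc = match pvLastIdx c l none with
      | some j => some j
      | none => acc := by
  induction l generalizing acc with
  | nil => simp [pvLastIdx]
  | cons p rest ih =>
    simp only [pvLastIdx, List.foldl_cons]
    by_cases h : c ∈ p.2.toList
    · simp only [h, if_pos]
      rw [show (rest.foldl (fun a q => if c ∈ q.2.toList then some q.1 else a) (some p.1)) =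
            pvLastIdx c rest (some p.1) from rfl, ih (some p.1)]
      cases pvLastIdx c rest none <;> rfl
    · simp only [h, if_neg, not_false_iff]
      exact ih acc

theorem pvSingleton_inj {a b : Char} (h : String.singleton a = String.singleton b) : a = b := by
  have := congrArg String.toList h
  simpa [String.singleton] using this

-- A's inner loop over (index, fontwidth) pairs collapses to one insert at the last match
theorem pvA_inner (c : Char) (l : List (Int × String)) (d : PySem.Dict String Int) :
    l.foldl (fun (w : PySem.Dict String Int) p =>
        if c ∈ p.2.toList then w.insert (String.singleton c) (p.1 + 2) else w) d
    = match pvLastIdx c l none with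
      | some i => d.insert (String.singleton c) (i + 2)
      | none => d := by
  induction l generalizing d with
  | nil => simp [pvLastIdx]
  | cons p rest ih =>
    simp only [List.foldl_cons]
    rw [show pvLastIdx c (p :: rest) none = pvLastIdx c rest (if c ∈ p.2.toList then some p.1 else none) from rfl,
        pvLastIdx_acc]
    by_cases h : c ∈ p.2.toList
    · simp only [h, if_pos]
      rw [ih]
      cases pvLastIdx c rest none with
      | none => rfl
      | some j => simp [PySem.Dict.insert_insert_self]
    · simp only [h, if_neg, not_false_iff]
      rw [ih]
      cases pvLastIdx c rest none <;> rfl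

-- B's inner loop over a string's chars: lookup afterwards
theorem pvB_inner (c : Char) (cs : List Char) (w : Int) (d : PySem.Dict String Int) :
    (cs.foldl (fun (d : PySem.Dict String Int) ch => d.insert (String.singleton ch) w) d).get?
        (String.singleton c)
    = if c ∈ cs then some w else d.get? (String.singleton c) := by
  induction cs generalizing d with
  | nil => simp
  | cons ch rest ih =>
    simp only [List.foldl_cons]
    rw [ih]
    by_cases hr : c ∈ rest
    · simp [hr]
    · by_cases he : c = ch
      · subst he
        simp [hr, PySem.Dict.get?_insert_self]
      · have hne : String.singleton c ≠ String.singleton ch := fun h => he (pvSingleton_inj h)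
        rw [PySem.Dict.get?_insert_of_ne _ _ hne]
        simp [hr, he]

-- B's first pass: lookup equals the last matching index
theorem pvB_build (c : Char) (l : List (Int × String)) (d : PySem.Dict String Int) :
    (l.foldl (fun (d : PySem.Dict String Int) p =>
        p.2.toList.foldl (fun (d : PySem.Dict String Int) ch =>
          d.insert (String.singleton ch) p.1) d) d).get? (String.singleton c)
    = match pvLastIdx c l none with
      | some i => some i
      | none => d.get? (String.singleton c) := by
  induction l generalizing d with
  | nil => simp [pvLastIdx]
  | cons p rest ih =>
    simp only [List.foldl_cons]
    rw [ih]
    by_cases h : c ∈ p.2.toList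
    · rw [show pvLastIdx c (p :: rest) none = pvLastIdx c rest (some p.1) from by
        simp [pvLastIdx, h], pvLastIdx_acc c rest (some p.1), pvB_inner]
      cases pvLastIdx c rest none <;> simp [h]
    · rw [show pvLastIdx c (p :: rest) none = pvLastIdx c rest none from by
        simp [pvLastIdx, h], pvB_inner]
      cases pvLastIdx c rest none <;> simp [h]

-- ===== VERDICT (by name: the statement is the Claim_ definition above) =====
theorem fontcharwidth_spec : Claim_equal_fontcharwidth := by
  intro fontwidths _
  unfold Spec_fontcharwidth fontcharwidth fontcharwidth_alt
  congr 1
  apply PySem.List.foldl_congr_mem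
  intro d c _
  rw [pvA_inner, pvB_build]
  simp only [PySem.Dict.get?_empty]
  cases pvLastIdx c (PySem.List.enumerate fontwidths) none <;> rfl
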